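-- pv_equiv track=rewrite | github.com/wul012/aiproj | src/minigpt/release_readiness.py | _readiness_status
-- ===== SOURCE A (Python) =====
-- from typing import Any
--
-- def _readiness_status(panels: list[dict[str, Any]], gate: dict[str, Any] | None) -> str:
--     if not isinstance(gate, dict):
--         return "incomplete"
--     statuses = [panel.get("status") for panel in panels]
--     if "fail" in statuses:
--         return "blocked"
--     if "warn" in statuses:
--         return "review"
--     return "ready"
-- ===== SOURCE B (Python) =====
-- from typing import Any
--
-- def _readiness_status(panels: list[dict[str, Any]], gate: dict[str, Any] | None) -> str:
--     if not isinstance(gate, dict):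
--         return "incomplete"
--     warn = False
--     for panel in panels:
--         status = panel.get("status")
--         if status == "fail":
--             return "blocked"
--         if status == "warn":
--             warn = True
--     return "review" if warn else "ready"
-- ===== Notes on version B (the rewrite author's own statement) =====
-- stated objective: simpler
-- what changed: Replaces the materialized statuses list plus two full membership scans with a single early-exit pass over panels that returns 'blocked' on the first fail and tracks a warn flag.
import Mathlib
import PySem

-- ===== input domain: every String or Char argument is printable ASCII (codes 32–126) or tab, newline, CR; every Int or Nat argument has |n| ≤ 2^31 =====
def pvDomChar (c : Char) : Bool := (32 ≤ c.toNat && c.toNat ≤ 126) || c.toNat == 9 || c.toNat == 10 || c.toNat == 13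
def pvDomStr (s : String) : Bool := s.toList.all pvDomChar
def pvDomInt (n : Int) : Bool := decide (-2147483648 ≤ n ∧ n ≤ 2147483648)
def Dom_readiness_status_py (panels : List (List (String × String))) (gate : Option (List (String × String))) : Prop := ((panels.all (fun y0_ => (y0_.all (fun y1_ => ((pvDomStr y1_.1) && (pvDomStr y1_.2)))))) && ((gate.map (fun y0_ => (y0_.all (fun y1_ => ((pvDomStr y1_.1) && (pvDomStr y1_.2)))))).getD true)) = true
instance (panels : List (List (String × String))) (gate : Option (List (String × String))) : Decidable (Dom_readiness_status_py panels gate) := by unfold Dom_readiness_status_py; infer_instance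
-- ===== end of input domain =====

-- B replaces A's materialized statuses list and two membership scans with one early-exit pass over panels tracking a warn flag (objective: simpler).

-- ===== PORT A =====
def readiness_status_py (panels : List (List (String × String))) (gate : Option (List (String × String))) : String :=
  match gate with
  | none => "incomplete"
  | some _ =>
    let statuses : List (Option String) := panels.map (fun panel => (PySem.Dict.ofList panel).get? "status")
    if (some "fail") ∈ statuses then "blocked"
    else if (some "warn") ∈ statuses then "review"
    else "ready"

-- ===== PORT B =====
-- B: single early-exit pass with a warn flag
def readinessLoop (panels : List (List (String × String))) (warn : Bool) : String :=
  match panels with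
  | [] => if warn then "review" else "ready"
  | panel :: rest =>
    let status := (PySem.Dict.ofList panel).get? "status"
    if status = some "fail" then "blocked"
    else if status = some "warn" then readinessLoop rest true
    else readinessLoop rest warn

def readiness_status_py_alt (panels : List (List (String × String))) (gate : Option (List (String × String))) : String :=
  match gate with
  | none => "incomplete"
  | some _ => readinessLoop panels false

-- ===== PRECONDITION & SPEC =====
def Spec_readiness_status_py (panels : List (List (String × String))) (gate : Option (List (String × String))) (out : String) : Prop := out = readiness_status_py_alt panels gate
instance (panels : List (List (String × String))) (gate : Option (List (String × String))) (out : String) : Decidable (Spec_readiness_status_py panels gate out) := by unfold Spec_readiness_status_py; infer_instance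

-- ===== CLAIM (what is proved, stated in full; the proofs are below) =====
def Claim_equal_readiness_status_py : Prop := ∀ (panels : List (List (String × String))) (gate : Option (List (String × String))), Dom_readiness_status_py panels gate → Spec_readiness_status_py panels gate (readiness_status_py panels gate)

-- ===== LEMMAS AND PROOFS =====

-- ===== VERDICT (by name: the statement is the Claim_ definition above) =====
theorem readinessLoop_eq (panels : List (List (String × String))) (warn : Bool) :
    readinessLoop panels warn =
      (if (some "fail") ∈ panels.map (fun panel => (PySem.Dict.ofList panel).get? "status") then "blocked"
       else if warn ∨ (some "warn") ∈ panels.map (fun panel => (PySem.Dict.ofList panel).get? "status") then "review"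
       else "ready") := by
  induction panels generalizing warn with
  | nil => simp [readinessLoop]
  | cons p rest ih =>
    simp only [readinessLoop, List.map_cons, List.mem_cons]
    by_cases hf : (PySem.Dict.ofList p).get? "status" = some "fail"
    · simp [hf]
    · by_cases hw : (PySem.Dict.ofList p).get? "status" = some "warn"
      · simp [hw, ih]
      · simp only [if_neg hf, if_neg hw, ih]
        by_cases hfr : (some "fail") ∈ rest.map (fun panel => (PySem.Dict.ofList panel).get? "status")
        · simp [hfr]
        · have h1 : ¬ some "fail" = (PySem.Dict.ofList p).get? "status" := fun h => hf (Eq.symm h)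
          have h2 : ¬ some "warn" = (PySem.Dict.ofList p).get? "status" := fun h => hw h.symm
          simp [h1, h2, hfr]

theorem readiness_status_py_spec : Claim_equal_readiness_status_py := by
  intro panels gate _
  unfold Spec_readiness_status_py readiness_status_py readiness_status_py_alt
  cases gate with
  | none => rfl
  | some g => simp [readinessLoop_eq]
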